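-- pv_equiv track=rewrite | github.com/DrewThomas09/RCM | RCM_MC/tools/build_dep_graph.py | render_text_summary
-- ===== SOURCE A (Python) =====
-- from collections import Counter, defaultdict
-- from typing import Dict, Iterable, List, Set, Tuple
--
-- def render_text_summary(edges: Dict[Tuple[str, str], int], file_counts: Counter) -> str:
--     """Plain-text summary — top importers per sub-package, sorted by file count."""
--     lines = []
--     lines.append(f"# Dependency graph summary — {sum(file_counts.values())} files across "
--                  f"{len(file_counts)} sub-packages")
--     lines.append("")
--
--     inbound: Dict[str, Counter] = defaultdict(Counter)
--     for (src, dst), n in edges.items():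
--         inbound[dst][src] += n
--
--     for subpkg in sorted(file_counts, key=lambda k: -file_counts[k]):
--         lines.append(f"## {subpkg}/ ({file_counts[subpkg]} files)")
--         top_in = inbound.get(subpkg, Counter()).most_common(6)
--         if top_in:
--             lines.append("  imported by:")
--             for src, n in top_in:
--                 lines.append(f"    {src:<20} ({n} imports)")
--         else:
--             lines.append("  (no internal importers — leaf/entry point)")
--         lines.append("")
--     return "\n".join(lines)
-- ===== SOURCE B (Python) =====
-- from collections import Counter
--
--
-- def _section(subpkg, files, edges):
--     cnt = Counter()
--     for (src, dst), n in edges.items():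
--         if dst == subpkg:
--             cnt[src] += n
--     top = cnt.most_common(6)
--     body = (["  imported by:"] + [f"    {src:<20} ({n} imports)" for src, n in top]
--             if top else ["  (no internal importers — leaf/entry point)"])
--     return [f"## {subpkg}/ ({files} files)"] + body + [""]
--
--
-- def render_text_summary(edges, file_counts):
--     header = (f"# Dependency graph summary — {sum(file_counts.values())} files across "
--               f"{len(file_counts)} sub-packages")
--     order = sorted(file_counts, key=lambda k: -file_counts[k])
--     return "\n".join([header, ""] + [ln for sp in order for ln in _section(sp, file_counts[sp], edges)])
-- ===== Notes on version B (the rewrite author's own statement) =====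
-- stated objective: alternative
-- what changed: B drops A's pre-aggregated inbound defaultdict index and its incremental lines list: it renders each sub-package section independently by a flat-map over the sorted sub-packages, building that package's importer Counter by a direct scan of edges.items().
import Mathlib
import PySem

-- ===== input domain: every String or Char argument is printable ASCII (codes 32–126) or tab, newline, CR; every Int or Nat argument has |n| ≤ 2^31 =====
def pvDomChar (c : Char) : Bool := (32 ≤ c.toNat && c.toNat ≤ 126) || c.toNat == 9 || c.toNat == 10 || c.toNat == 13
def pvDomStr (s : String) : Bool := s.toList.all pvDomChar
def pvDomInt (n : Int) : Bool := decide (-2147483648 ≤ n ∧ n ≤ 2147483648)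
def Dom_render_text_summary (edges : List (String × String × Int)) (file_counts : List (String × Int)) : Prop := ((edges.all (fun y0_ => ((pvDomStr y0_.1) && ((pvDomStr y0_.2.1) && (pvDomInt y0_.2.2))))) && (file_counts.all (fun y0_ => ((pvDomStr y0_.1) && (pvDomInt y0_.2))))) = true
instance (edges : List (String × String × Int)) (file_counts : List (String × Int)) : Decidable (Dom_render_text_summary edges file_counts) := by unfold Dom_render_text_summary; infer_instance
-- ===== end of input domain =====

-- B re-renders each sub-package section independently (flat-map) with a per-package scan of the
-- edges instead of A's pre-aggregated inbound index and growing lines list; alternative, not faster.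

-- f"{s:<20}" : left-justify to width 20 with spaces (exact on ASCII; shared, both Pythons format the same way)
def pvLjust20 (s : String) : String :=
  String.ofList (s.toList ++ List.replicate (20 - s.toList.length) ' ')

-- ===== PORT A =====
-- Counter.most_common(6) is ported by its documented semantics: sorted(items, key=count, reverse=True)[:6] (stable)
def render_text_summary (edges : List (String × String × Int)) (file_counts : List (String × Int)) : String :=
  let ed : PySem.Dict (String × String) Int :=
    PySem.Dict.ofList (edges.map (fun e => ((e.1, e.2.1), e.2.2)))
  let fc : PySem.Dict String Int := PySem.Dict.ofList file_counts
  let lines : List String :=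
    ["# Dependency graph summary — " ++ PySem.Int.toStr (fc.values.foldl (· + ·) 0) ++
       " files across " ++ PySem.Int.toStr (Int.ofNat fc.size) ++ " sub-packages", ""]
  let inbound : PySem.Dict String (PySem.Dict String Int) :=
    ed.items.foldl
      (fun ib p => ib.modify p.1.2 PySem.Dict.empty (fun c => c.modify p.1.1 0 (· + p.2)))
      PySem.Dict.empty
  let lines :=
    (PySem.List.sorted fc.keys (fun k => -(fc.getD k 0)) false).foldl
      (fun lines subpkg =>
        let lines := lines ++ ["## " ++ subpkg ++ "/ (" ++ PySem.Int.toStr (fc.getD subpkg 0) ++ " files)"]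
        let top_in := (PySem.List.sorted (inbound.getD subpkg PySem.Dict.empty).items (fun q => q.2) true).take 6
        let lines :=
          if top_in ≠ [] then
            (lines ++ ["  imported by:"]) ++
              top_in.map (fun q => "    " ++ pvLjust20 q.1 ++ " (" ++ PySem.Int.toStr q.2 ++ " imports)")
          else lines ++ ["  (no internal importers — leaf/entry point)"]
        lines ++ [""])
      lines
  PySem.Str.join "\n" lines

-- ===== PORT B =====
def pvSection (subpkg : String) (files : Int) (ed : PySem.Dict (String × String) Int) : List String :=
  let cnt : PySem.Dict String Int :=
    ed.items.foldl (fun c p => if p.1.2 == subpkg then c.modify p.1.1 0 (· + p.2) else c) PySem.Dict.empty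
  let top := (PySem.List.sorted cnt.items (fun q => q.2) true).take 6
  let body :=
    if top ≠ [] then
      "  imported by:" :: top.map (fun q => "    " ++ pvLjust20 q.1 ++ " (" ++ PySem.Int.toStr q.2 ++ " imports)")
    else ["  (no internal importers — leaf/entry point)"]
  ("## " ++ subpkg ++ "/ (" ++ PySem.Int.toStr files ++ " files)") :: body ++ [""]

def render_text_summary_alt (edges : List (String × String × Int)) (file_counts : List (String × Int)) : String :=
  let ed : PySem.Dict (String × String) Int :=
    PySem.Dict.ofList (edges.map (fun e => ((e.1, e.2.1), e.2.2)))
  let fc : PySem.Dict String Int := PySem.Dict.ofList file_counts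
  let header : String :=
    "# Dependency graph summary — " ++ PySem.Int.toStr (fc.values.foldl (· + ·) 0) ++
      " files across " ++ PySem.Int.toStr (Int.ofNat fc.size) ++ " sub-packages"
  let order := PySem.List.sorted fc.keys (fun k => -(fc.getD k 0)) false
  PySem.Str.join "\n" (header :: "" :: order.flatMap (fun sp => pvSection sp (fc.getD sp 0) ed))

-- ===== PRECONDITION & SPEC =====
def Spec_render_text_summary (edges : List (String × String × Int)) (file_counts : List (String × Int)) (out : String) : Prop := out = render_text_summary_alt edges file_counts
instance (edges : List (String × String × Int)) (file_counts : List (String × Int)) (out : String) : Decidable (Spec_render_text_summary edges file_counts out) := by unfold Spec_render_text_summary; infer_instance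

-- ===== CLAIM (what is proved, stated in full; the proofs are below) =====
def Claim_equal_render_text_summary : Prop := ∀ (edges : List (String × String × Int)) (file_counts : List (String × Int)), Dom_render_text_summary edges file_counts → Spec_render_text_summary edges file_counts (render_text_summary edges file_counts)

-- ===== LEMMAS AND PROOFS =====

-- A's aggregated index, read back at one key, is B's filtered per-key counting loop.
theorem pv_getD_inbound (l : List ((String × String) × Int)) (k : String)
    (ib : PySem.Dict String (PySem.Dict String Int)) :
    (l.foldl (fun ib p => ib.modify p.1.2 PySem.Dict.empty (fun c => c.modify p.1.1 0 (· + p.2))) ib).getD k PySem.Dict.empty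
      = l.foldl (fun c p => if p.1.2 == k then c.modify p.1.1 0 (· + p.2) else c) (ib.getD k PySem.Dict.empty) := by
  induction l generalizing ib with
  | nil => rfl
  | cons p l ih =>
      simp only [List.foldl_cons, ih]
      congr 1
      rw [PySem.Dict.getD_modify]
      by_cases h : p.1.2 = k
      · simp [h]
      · simp [h, Ne.symm h]

theorem pv_ite_append {c : Prop} [Decidable c] (a x y : List String) :
    (if c then a ++ x else a ++ y) = a ++ (if c then x else y) := by
  split <;> rfl

-- ===== VERDICT (by name: the statement is the Claim_ definition above) =====
theorem render_text_summary_spec : Claim_equal_render_text_summary := by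
  intro edges file_counts _
  unfold Spec_render_text_summary render_text_summary render_text_summary_alt
  set ed : PySem.Dict (String × String) Int :=
    PySem.Dict.ofList (edges.map (fun e => ((e.1, e.2.1), e.2.2))) with hed
  set fc : PySem.Dict String Int := PySem.Dict.ofList file_counts with hfc
  have hstep : ∀ (acc : List String) (sp : String),
      (fun (lines : List String) (subpkg : String) =>
        let lines := lines ++ ["## " ++ subpkg ++ "/ (" ++ PySem.Int.toStr (fc.getD subpkg 0) ++ " files)"]
        let top_in := (PySem.List.sorted
            ((ed.items.foldl
              (fun ib p => ib.modify p.1.2 PySem.Dict.empty (fun c => c.modify p.1.1 0 (· + p.2)))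
              PySem.Dict.empty).getD subpkg PySem.Dict.empty).items (fun q => q.2) true).take 6
        let lines :=
          if top_in ≠ [] then
            (lines ++ ["  imported by:"]) ++
              top_in.map (fun q => "    " ++ pvLjust20 q.1 ++ " (" ++ PySem.Int.toStr q.2 ++ " imports)")
          else lines ++ ["  (no internal importers — leaf/entry point)"]
        lines ++ [""]) acc sp
      = acc ++ pvSection sp (fc.getD sp 0) ed := by
    intro acc sp
    simp only [pvSection, pv_getD_inbound, PySem.Dict.getD_empty, pv_ite_append, List.append_assoc,
      List.cons_append, List.nil_append]
    split <;> simp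
  simp only [hstep, PySem.List.foldl_append_eq_flatMap]
  rfl
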